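-- pv_equiv track=rewrite | github.com/JosephNasr/ynab-migrator | ynab_migrator/migration.py | resolve_apply_entities
-- ===== SOURCE A (Python) =====
-- from typing import Any, Dict, Iterable, List, Optional, Set, Tuple
--
-- APPLY_ENTITY_EXECUTION_ORDER: Tuple[str, ...] = (
--     "accounts",
--     "category_groups",
--     "categories",
--     "payees",
--     "transactions",
--     "scheduled_transactions",
--     "month_budgets",
-- )
--
-- APPLY_ENTITY_DEPENDENCIES: Dict[str, Set[str]] = {
--     "accounts": set(),
--     "category_groups": set(),
--     "categories": {"accounts", "category_groups"},
--     "payees": set(),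
--     "transactions": {"accounts", "categories", "payees"},
--     "scheduled_transactions": {"accounts", "categories", "payees"},
--     "month_budgets": {"categories"},
-- }
--
-- def _apply_entity_closure(entity: str, visited: Optional[Set[str]] = None) -> Set[str]:
--     if entity not in APPLY_ENTITY_DEPENDENCIES:
--         raise ValueError(
--             "unknown apply entity scope "
--             f"'{entity}'. Supported values: {', '.join(APPLY_ENTITY_EXECUTION_ORDER)}"
--         )
--     if visited is None:
--         visited = set()
--     if entity in visited:
--         return visited
--     visited.add(entity)
--     for dependency in APPLY_ENTITY_DEPENDENCIES[entity]:
--         _apply_entity_closure(dependency, visited)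
--     return visited
--
-- def resolve_apply_entities(selected_entities: Optional[Iterable[str]]) -> List[str]:
--     if selected_entities is None:
--         return list(APPLY_ENTITY_EXECUTION_ORDER)
--
--     normalized: List[str] = []
--     for raw in selected_entities:
--         if raw is None:
--             continue
--         token = str(raw).strip().lower()
--         if not token:
--             continue
--         if token in {"everything", "all", "*"}:
--             return list(APPLY_ENTITY_EXECUTION_ORDER)
--         normalized.append(token)
--
--     if not normalized:
--         return list(APPLY_ENTITY_EXECUTION_ORDER)
--
--     scoped: Set[str] = set()
--     for token in normalized:
--         scoped.update(_apply_entity_closure(token))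
--
--     return [entity for entity in APPLY_ENTITY_EXECUTION_ORDER if entity in scoped]
-- ===== SOURCE B (Python) =====
-- from typing import Iterable, List, Optional
--
-- APPLY_ENTITY_EXECUTION_ORDER = (
--     "accounts",
--     "category_groups",
--     "categories",
--     "payees",
--     "transactions",
--     "scheduled_transactions",
--     "month_budgets",
-- )
--
-- # Transitive dependency closures, precomputed once: no recursion at resolve time.
-- _APPLY_ENTITY_CLOSURES = {
--     "accounts": frozenset({"accounts"}),
--     "category_groups": frozenset({"category_groups"}),
--     "categories": frozenset({"categories", "accounts", "category_groups"}),
--     "payees": frozenset({"payees"}),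
--     "transactions": frozenset({"transactions", "accounts", "categories", "category_groups", "payees"}),
--     "scheduled_transactions": frozenset({"scheduled_transactions", "accounts", "categories", "category_groups", "payees"}),
--     "month_budgets": frozenset({"month_budgets", "categories", "accounts", "category_groups"}),
-- }
--
--
-- def resolve_apply_entities(selected_entities: Optional[Iterable[str]]) -> List[str]:
--     if selected_entities is None:
--         return list(APPLY_ENTITY_EXECUTION_ORDER)
--
--     # staged passes: normalize, drop blanks, wildcard check, validate, select
--     tokens = [str(r).strip().lower() for r in selected_entities if r is not None]
--     tokens = [t for t in tokens if t]
--     if not tokens or not set(tokens).isdisjoint({"everything", "all", "*"}):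
--         return list(APPLY_ENTITY_EXECUTION_ORDER)
--
--     for token in tokens:
--         if token not in _APPLY_ENTITY_CLOSURES:
--             raise ValueError(
--                 "unknown apply entity scope "
--                 f"'{token}'. Supported values: {', '.join(APPLY_ENTITY_EXECUTION_ORDER)}"
--             )
--
--     return [
--         entity
--         for entity in APPLY_ENTITY_EXECUTION_ORDER
--         if any(entity in _APPLY_ENTITY_CLOSURES[t] for t in tokens)
--     ]
-- ===== Notes on version B (the rewrite author's own statement) =====
-- stated objective: simpler
-- what changed: Replaces the recursive _apply_entity_closure helper and the single normalize-with-early-return loop building a scoped set by staged comprehension passes over a precomputed transitive-closure table: normalize, filter blanks, wildcard check, validate, then select each ordered entity by an any-membership test with no scoped set at all.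
import Mathlib
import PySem

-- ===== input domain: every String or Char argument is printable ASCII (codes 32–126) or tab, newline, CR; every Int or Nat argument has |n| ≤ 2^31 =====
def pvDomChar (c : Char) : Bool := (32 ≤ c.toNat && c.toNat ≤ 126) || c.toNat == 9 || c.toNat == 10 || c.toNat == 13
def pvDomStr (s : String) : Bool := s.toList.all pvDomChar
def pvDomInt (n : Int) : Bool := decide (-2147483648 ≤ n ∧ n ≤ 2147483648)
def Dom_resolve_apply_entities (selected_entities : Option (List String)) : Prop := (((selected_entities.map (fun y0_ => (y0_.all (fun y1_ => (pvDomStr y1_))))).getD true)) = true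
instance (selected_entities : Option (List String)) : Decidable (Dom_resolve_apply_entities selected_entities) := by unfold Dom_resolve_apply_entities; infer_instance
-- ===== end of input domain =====

-- B replaces the recursive dependency-closure helper and the single normalize-and-collect
-- loop by staged comprehension passes over a precomputed closure table, selecting each
-- ordered entity by a direct membership test (objective: simpler).

-- ===== PORT A =====

def pvOrderA : List String :=
  ["accounts", "category_groups", "categories", "payees", "transactions",
   "scheduled_transactions", "month_budgets"]

-- APPLY_ENTITY_DEPENDENCIES; the Python values are sets consumed only to build another
-- set, so a fixed list order is exact here.
def pvDepsA : PySem.Dict String (List String) := PySem.Dict.ofList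
  [("accounts", []), ("category_groups", []),
   ("categories", ["accounts", "category_groups"]), ("payees", []),
   ("transactions", ["accounts", "categories", "payees"]),
   ("scheduled_transactions", ["accounts", "categories", "payees"]),
   ("month_budgets", ["categories"])]

-- _apply_entity_closure; `none` = the ValueError. Fuel only makes the recursion total
-- (the fixed graph has depth < 8); it changes no result.
def pvClosureA (fuel : Nat) (entity : String) (visited : PySem.Set String) :
    Option (PySem.Set String) :=
  match fuel with
  | 0 => none
  | fuel + 1 =>
    match PySem.Dict.get? pvDepsA entity with
    | none => none
    | some deps =>
      if PySem.Set.contains visited entity then some visited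
      else
        deps.foldl (fun acc d => acc.bind (fun v => pvClosureA fuel d v))
          (some (PySem.Set.add visited entity))

-- the normalization loop; `none` = early return of the full order ("everything"/"all"/"*")
def pvNormA : List String → List String → Option (List String)
  | [], acc => some acc
  | raw :: rest, acc =>
    let token := PySem.Str.lower (PySem.Str.strip raw)
    if token = "" then pvNormA rest acc
    else if token = "everything" ∨ token = "all" ∨ token = "*" then none
    else pvNormA rest (acc ++ [token])

def resolve_apply_entities (selected_entities : Option (List String)) : List String :=
  match selected_entities with
  | none => pvOrderA
  | some xs =>
    match pvNormA xs [] with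
    | none => pvOrderA
    | some normalized =>
      if normalized = [] then pvOrderA
      else
        match normalized.foldl
            (fun acc t => acc.bind (fun s =>
              (pvClosureA 8 t PySem.Set.empty).map (fun c => PySem.Set.union s c)))
            (some PySem.Set.empty) with
        | none => []   -- ValueError path; excluded by Pre_
        | some sc => pvOrderA.filter (fun e => PySem.Set.contains sc e)

-- ===== PORT B =====

def pvOrderB : List String :=
  ["accounts", "category_groups", "categories", "payees", "transactions",
   "scheduled_transactions", "month_budgets"]

-- _APPLY_ENTITY_CLOSURES: precomputed transitive closures (frozensets consumed only by
-- membership tests, so list order is exact); `none` = key not in the dict.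
def pvClosB? : String → Option (List String)
  | "accounts" => some ["accounts"]
  | "category_groups" => some ["category_groups"]
  | "categories" => some ["categories", "accounts", "category_groups"]
  | "payees" => some ["payees"]
  | "transactions" =>
      some ["transactions", "accounts", "categories", "category_groups", "payees"]
  | "scheduled_transactions" =>
      some ["scheduled_transactions", "accounts", "categories", "category_groups", "payees"]
  | "month_budgets" => some ["month_budgets", "categories", "accounts", "category_groups"]
  | _ => none

def resolve_apply_entities_alt (selected_entities : Option (List String)) : List String :=
  match selected_entities with
  | none => pvOrderB
  | some xs =>
    let tokens := (xs.map (fun r => PySem.Str.lower (PySem.Str.strip r))).filter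
      (fun t => t != "")
    if tokens = [] ∨ tokens.any (fun t => t == "everything" || t == "all" || t == "*") then
      pvOrderB
    else if tokens.all (fun t => (pvClosB? t).isSome) then
      pvOrderB.filter (fun e => tokens.any (fun t => ((pvClosB? t).getD []).contains e))
    else []   -- ValueError path; excluded by Pre_

-- ===== PRECONDITION & SPEC =====
-- Pre_ excludes exactly the inputs on which Python A raises ValueError: a selection with
-- no "everything"/"all"/"*" token whose normalization contains an unknown entity name.
def pvKnownEntities : List String :=
  ["accounts", "category_groups", "categories", "payees", "transactions",
   "scheduled_transactions", "month_budgets"]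

def pvPreOk (xs : List String) : Bool :=
  let toks := xs.map (fun s => PySem.Str.lower (PySem.Str.strip s))
  toks.any (fun t => t == "everything" || t == "all" || t == "*") ||
    toks.all (fun t => t == "" || pvKnownEntities.contains t)

def Pre_resolve_apply_entities (selected_entities : Option (List String)) : Prop :=
  ((selected_entities.map pvPreOk).getD true) = true
instance (selected_entities : Option (List String)) : Decidable (Pre_resolve_apply_entities selected_entities) := by unfold Pre_resolve_apply_entities; infer_instance

def pvWitness_resolve_apply_entities : Option (List String) := some [" Transactions ", "month_budgets"]

def Spec_resolve_apply_entities (selected_entities : Option (List String)) (out : List String) : Prop := out = resolve_apply_entities_alt selected_entities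
instance (selected_entities : Option (List String)) (out : List String) : Decidable (Spec_resolve_apply_entities selected_entities out) := by unfold Spec_resolve_apply_entities; infer_instance

-- ===== CLAIM (what is proved, stated in full; the proofs are below) =====
def Claim_equal_resolve_apply_entities : Prop := ∀ (selected_entities : Option (List String)), Dom_resolve_apply_entities selected_entities → Pre_resolve_apply_entities selected_entities → Spec_resolve_apply_entities selected_entities (resolve_apply_entities selected_entities)

-- ===== LEMMAS AND PROOFS =====

-- a wildcard token anywhere makes A's normalization loop return early
theorem pvNorm_none (xs acc : List String)
    (h : ∃ s ∈ xs, (PySem.Str.lower (PySem.Str.strip s) = "everything" ∨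
      PySem.Str.lower (PySem.Str.strip s) = "all" ∨ PySem.Str.lower (PySem.Str.strip s) = "*")) :
    pvNormA xs acc = none := by
  induction xs generalizing acc with
  | nil => simp at h
  | cons s rest ih =>
    obtain ⟨s', hs', hw⟩ := h
    simp only [pvNormA]
    rcases List.mem_cons.mp hs' with heq | hmem
    · subst heq
      have hne : ¬ (PySem.Str.lower (PySem.Str.strip s') = "") := by
        rcases hw with h1 | h1 | h1 <;> simp [h1]
      rw [if_neg hne, if_pos hw]
    · split_ifs with h1 h2
      · exact ih acc ⟨s', hmem, hw⟩
      · rfl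
      · exact ih _ ⟨s', hmem, hw⟩

-- without a wildcard, A's loop produces exactly B's staged map-then-filter
theorem pvNorm_some (xs : List String)
    (h : ∀ s ∈ xs, ¬ (PySem.Str.lower (PySem.Str.strip s) = "everything" ∨
      PySem.Str.lower (PySem.Str.strip s) = "all" ∨ PySem.Str.lower (PySem.Str.strip s) = "*")) :
    ∀ acc, pvNormA xs acc =
      some (acc ++ (xs.map (fun r => PySem.Str.lower (PySem.Str.strip r))).filter
        (fun t => t != "")) := by
  induction xs with
  | nil => intro acc; simp [pvNormA]
  | cons s rest ih =>
    intro acc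
    have hrest : ∀ s' ∈ rest, _ := fun s' h' => h s' (List.mem_cons_of_mem _ h')
    simp only [pvNormA]
    split_ifs with h1 h2
    · rw [ih hrest acc]
      simp [h1]
    · exact absurd h2 (h s List.mem_cons_self)
    · rw [ih hrest (acc ++ [PySem.Str.lower (PySem.Str.strip s)])]
      simp [h1]

-- for each known entity, A's recursive closure and B's table agree as sets
theorem pvClo_known (t : String) (ht : t ∈ pvKnownEntities) :
    ∃ ca cb, pvClosureA 8 t PySem.Set.empty = some ca ∧
      pvClosB? t = some cb ∧ ∀ e, e ∈ ca ↔ e ∈ cb := by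
  simp only [pvKnownEntities, List.mem_cons, List.not_mem_nil, or_false] at ht
  rcases ht with rfl | rfl | rfl | rfl | rfl | rfl | rfl <;>
    exact ⟨_, _, rfl, rfl, by
      intro e
      simp only [PySem.Set.mem_add, PySem.Set.empty, List.not_mem_nil, false_or,
        List.mem_cons, or_false]
      try tauto⟩

-- A's accumulation fold over known tokens succeeds, and an element lies in its result
-- iff it was already accumulated or lies in some token's precomputed closure
theorem pvFoldA (ts : List String) (hts : ∀ t ∈ ts, t ∈ pvKnownEntities) :
    ∀ (sA : PySem.Set String),
    ∃ sA', ts.foldl (fun acc t => acc.bind (fun s =>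
          (pvClosureA 8 t PySem.Set.empty).map (fun c => PySem.Set.union s c)))
        (some sA) = some sA' ∧
      (∀ e, e ∈ sA' ↔ (e ∈ sA ∨ ∃ t ∈ ts, e ∈ (pvClosB? t).getD [])) := by
  induction ts with
  | nil => intro sA; exact ⟨sA, rfl, by simp⟩
  | cons t rest ih =>
    intro sA
    obtain ⟨ca, cb, hca, hcb, hcc⟩ := pvClo_known t (hts t List.mem_cons_self)
    have hrest : ∀ t' ∈ rest, t' ∈ pvKnownEntities := fun t' h' => hts t' (List.mem_cons_of_mem _ h')
    obtain ⟨sA', h1, h2⟩ := ih hrest (PySem.Set.union sA ca)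
    have hca' : pvClosureA 8 t ([] : PySem.Set String) = some ca := hca
    refine ⟨sA', by simpa [List.foldl_cons, hca'] using h1, ?_⟩
    intro e
    rw [h2 e, PySem.Set.mem_union]
    constructor
    · rintro ((h | h) | ⟨t', ht', h⟩)
      · exact Or.inl h
      · exact Or.inr ⟨t, List.mem_cons_self, by simp [hcb, (hcc e).mp h]⟩
      · exact Or.inr ⟨t', List.mem_cons_of_mem _ ht', h⟩
    · rintro (h | ⟨t', ht', h⟩)
      · exact Or.inl (Or.inl h)
      · rcases List.mem_cons.mp ht' with rfl | hm
        · exact Or.inl (Or.inr ((hcc e).mpr (by simpa [hcb] using h)))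
        · exact Or.inr ⟨t', hm, h⟩

-- membership in the supported-entities list means the closure table has an entry
theorem pvKnown_isSome (t : String) (ht : t ∈ pvKnownEntities) : (pvClosB? t).isSome := by
  simp only [pvKnownEntities, List.mem_cons, List.not_mem_nil, or_false] at ht
  rcases ht with rfl | rfl | rfl | rfl | rfl | rfl | rfl <;> rfl

-- ===== VERDICT (by name: the statement is the Claim_ definition above) =====
theorem resolve_apply_entities_spec : Claim_equal_resolve_apply_entities := by
  intro sel _hdom hpre
  unfold Spec_resolve_apply_entities
  match sel with
  | none => rfl
  | some xs =>
    simp only [resolve_apply_entities, resolve_apply_entities_alt]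
    unfold Pre_resolve_apply_entities pvPreOk at hpre
    simp only [Option.map_some, Option.getD_some, Bool.or_eq_true, List.any_eq_true,
      List.all_eq_true, List.mem_map, Bool.or_eq_true, beq_iff_eq,
      List.contains_eq_mem, decide_eq_true_eq] at hpre
    by_cases hwild : ∃ s ∈ xs, (PySem.Str.lower (PySem.Str.strip s) = "everything" ∨
        PySem.Str.lower (PySem.Str.strip s) = "all" ∨ PySem.Str.lower (PySem.Str.strip s) = "*")
    · -- a wildcard: A's loop returns early; B's any-pass fires
      rw [pvNorm_none xs [] hwild]
      obtain ⟨s, hs, hw⟩ := hwild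
      have hB : ((xs.map (fun r => PySem.Str.lower (PySem.Str.strip r))).filter
          (fun t => t != "")).any (fun t => t == "everything" || t == "all" || t == "*") = true := by
        refine List.any_eq_true.mpr ⟨PySem.Str.lower (PySem.Str.strip s), ?_, ?_⟩
        · refine List.mem_filter.mpr ⟨List.mem_map.mpr ⟨s, hs, rfl⟩, ?_⟩
          rcases hw with h1 | h1 | h1 <;> simp [h1]
        · rcases hw with h1 | h1 | h1 <;> simp [h1]
      simp only [hB, or_true, if_pos]
      rfl
    · -- no wildcard: A's loop equals the staged map+filter
      rw [not_exists] at hwild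
      replace hwild : ∀ s ∈ xs, ¬ (PySem.Str.lower (PySem.Str.strip s) = "everything" ∨
          PySem.Str.lower (PySem.Str.strip s) = "all" ∨ PySem.Str.lower (PySem.Str.strip s) = "*") :=
        fun s hs hw => hwild s ⟨hs, hw⟩
      rw [pvNorm_some xs hwild []]
      simp only [List.nil_append]
      set ts := (xs.map (fun r => PySem.Str.lower (PySem.Str.strip r))).filter
        (fun t => t != "") with hts
      have hBany : ts.any (fun t => t == "everything" || t == "all" || t == "*") = false := by
        rw [List.any_eq_false]
        rintro t ht
        obtain ⟨hmem, -⟩ := List.mem_filter.mp ht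
        obtain ⟨s, hs, rfl⟩ := List.mem_map.mp hmem
        simp only [Bool.or_eq_true, beq_iff_eq]
        exact fun h => hwild s hs (or_assoc.mp h)
      by_cases hemp : ts = []
      · rw [if_pos hemp, if_pos (Or.inl hemp)]
        rfl
      · have hknown : ∀ t ∈ ts, t ∈ pvKnownEntities := by
          intro t ht
          obtain ⟨hmem, hne⟩ := List.mem_filter.mp ht
          obtain ⟨s, hs, rfl⟩ := List.mem_map.mp hmem
          rcases hpre with ⟨w, ⟨s', hs', rfl⟩, hw⟩ | hall
          · exact absurd (or_assoc.mp hw) (hwild s' hs')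
          · rcases hall _ ⟨s, hs, rfl⟩ with heq | hmem'
            · simp [heq] at hne
            · exact hmem'
        have hall : ts.all (fun t => (pvClosB? t).isSome) = true :=
          List.all_eq_true.mpr (fun t ht => pvKnown_isSome t (hknown t ht))
        obtain ⟨sA', h1, h2⟩ := pvFoldA ts hknown PySem.Set.empty
        rw [if_neg hemp, if_neg (by simp [hemp, hBany]), if_pos hall, h1]
        have hOrd : pvOrderB = pvOrderA := rfl
        rw [hOrd]
        refine List.filter_congr ?_
        intro e _
        have : e ∈ sA' ↔ ∃ t ∈ ts, e ∈ (pvClosB? t).getD [] := by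
          rw [h2 e]; simp [PySem.Set.empty]
        rw [Bool.eq_iff_iff]
        simp only [PySem.Set.contains_eq_listContains, List.contains_eq_mem,
          List.any_eq_true, decide_eq_true_eq]
        exact this
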